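-- pv_equiv track=rewrite | github.com/Aman6744/handtodigital | src/Preprocess_image.py | preprocess_label
-- ===== SOURCE A (Python) =====
-- def preprocess_label(text, maxTextLength):
--     cost = 0
--     for i in range(len(text)):
--         if i != 0 and text[i] == text[i-1]:
--             cost += 2
--         else:
--             cost += 1
--
--         if cost > maxTextLength:
--             return text[:i]
--
--     return text
-- ===== SOURCE B (Python) =====
-- def preprocess_label(text, maxTextLength):
--     # cost of keeping the first k characters: k plus one extra per repeated adjacent char
--     def cost(k):
--         return k + sum(1 for j in range(1, k) if text[j] == text[j - 1])
--
--     # cost(k) is strictly increasing in k, so binary-search the largest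
--     # prefix length whose cost stays within the limit.
--     lo, hi = 0, len(text)
--     while lo < hi:
--         mid = (lo + hi + 1) // 2
--         if cost(mid) <= maxTextLength:
--             lo = mid
--         else:
--             hi = mid - 1
--     return text[:lo]
-- ===== Notes on version B (the rewrite author's own statement) =====
-- stated objective: alternative
-- what changed: Replaces A's streaming accumulate-with-early-exit loop by a binary search over prefix lengths: the repeat-weighted cost of a prefix is strictly increasing, so B bisects for the largest prefix length whose cost stays within the limit, recomputing the cost of a probe prefix on demand.
import Mathlib
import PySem

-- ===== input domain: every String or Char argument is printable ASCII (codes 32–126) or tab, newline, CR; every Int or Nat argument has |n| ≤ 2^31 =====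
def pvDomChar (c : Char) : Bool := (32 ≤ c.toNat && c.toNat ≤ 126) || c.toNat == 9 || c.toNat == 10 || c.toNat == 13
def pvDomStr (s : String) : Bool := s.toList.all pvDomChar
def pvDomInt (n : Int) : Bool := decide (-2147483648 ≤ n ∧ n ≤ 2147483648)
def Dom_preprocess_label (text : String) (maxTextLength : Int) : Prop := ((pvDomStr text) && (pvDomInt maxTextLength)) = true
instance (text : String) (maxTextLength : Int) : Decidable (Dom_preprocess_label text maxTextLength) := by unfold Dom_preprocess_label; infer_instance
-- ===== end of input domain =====

-- B replaces A's streaming accumulate-with-early-exit loop by a binary search over prefix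
-- lengths (the prefix cost is strictly increasing); same return value, different algorithm.

-- ===== PORT A =====
-- A's for-loop over i with early return, as index recursion over the same state (i, cost).
def pvLoopA (cs : List Char) (m : Int) (i : Nat) (cost : Int) : String :=
  if h : i < cs.length then
    -- if i != 0 and text[i] == text[i-1]: cost += 2 else: cost += 1
    let cost' : Int := if i ≠ 0 ∧ cs[i]? = cs[i-1]? then cost + 2 else cost + 1
    if cost' > m then String.mk (cs.take i)   -- text[:i], i ≥ 0: exact slice
    else pvLoopA cs m (i+1) cost'
  else String.mk cs                            -- return text
termination_by cs.length - i

def preprocess_label (text : String) (maxTextLength : Int) : String :=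
  pvLoopA text.toList maxTextLength 0 0

-- ===== PORT B =====
-- cost(k) = k + sum(1 for j in range(1, k) if text[j] == text[j-1]); j ranges over 1..k-1,
-- always in range when k ≤ len(text), so Option equality of pyGet? is exact here.
def pvCostB (cs : List Char) (k : Int) : Int :=
  k + (PySem.List.pyRange 1 k 1).foldl
        (fun acc j => if PySem.List.pyGet? cs j = PySem.List.pyGet? cs (j - 1) then acc + 1 else acc) 0

-- while lo < hi: mid = (lo+hi+1)//2; if cost(mid) <= m: lo = mid else: hi = mid-1
def pvBS (cs : List Char) (m : Int) (lo hi : Nat) : Nat :=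
  if lo < hi then
    let mid := (lo + hi + 1) / 2
    if pvCostB cs (mid : Int) ≤ m then pvBS cs m mid hi else pvBS cs m lo (mid - 1)
  else lo
termination_by hi - lo
decreasing_by all_goals omega

def preprocess_label_alt (text : String) (maxTextLength : Int) : String :=
  let cs := text.toList
  String.mk (cs.take (pvBS cs maxTextLength 0 cs.length))   -- text[:lo], lo ≥ 0: exact slice

-- ===== PRECONDITION & SPEC =====
def Spec_preprocess_label (text : String) (maxTextLength : Int) (out : String) : Prop := out = preprocess_label_alt text maxTextLength
instance (text : String) (maxTextLength : Int) (out : String) : Decidable (Spec_preprocess_label text maxTextLength out) := by unfold Spec_preprocess_label; infer_instance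

-- ===== CLAIM (what is proved, stated in full; the proofs are below) =====
def Claim_equal_preprocess_label : Prop := ∀ (text : String) (maxTextLength : Int), Dom_preprocess_label text maxTextLength → Spec_preprocess_label text maxTextLength (preprocess_label text maxTextLength)

-- ===== LEMMAS AND PROOFS =====

-- weight of a char given the previous char (none at index 0)
def pvW (prev : Option Char) (c : Char) : Int := if prev = some c then 2 else 1

-- spec: relative index of the first position whose cumulative cost from `cost` exceeds m
def pvF (m : Int) (cost : Int) (prev : Option Char) : List Char → Option Nat
  | [] => none
  | c :: rest =>
    let cost' := cost + pvW prev c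
    if cost' > m then some 0 else (pvF m cost' (some c) rest).map (· + 1)

-- spec: cumulative cost of the first k chars of cs, given the char preceding cs
def pvC (prev : Option Char) : List Char → Nat → Int
  | [], _ => 0
  | _ :: _, 0 => 0
  | c :: rest, k + 1 => pvW prev c + pvC (some c) rest k

theorem pvW_ge_one (prev : Option Char) (c : Char) : 1 ≤ pvW prev c := by
  unfold pvW; split <;> omega

theorem pvC_zero (prev : Option Char) (cs : List Char) : pvC prev cs 0 = 0 := by
  cases cs <;> rfl

theorem pvC_nonneg (cs : List Char) : ∀ (prev : Option Char) (k : Nat), 0 ≤ pvC prev cs k := by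
  induction cs with
  | nil => intro prev k; simp [pvC]
  | cons c rest ih =>
    intro prev k
    cases k with
    | zero => simp [pvC]
    | succ k => have := pvW_ge_one prev c; have := ih (some c) k; simp only [pvC]; omega

theorem pvC_succ_le (cs : List Char) : ∀ (prev : Option Char) (k : Nat),
    pvC prev cs k ≤ pvC prev cs (k + 1) := by
  induction cs with
  | nil => intro prev k; simp [pvC]
  | cons c rest ih =>
    intro prev k
    cases k with
    | zero =>
      have := pvW_ge_one prev c
      have := pvC_nonneg rest (some c) 0
      simp only [pvC]; omega
    | succ k => have := ih (some c) k; simp only [pvC]; omega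

theorem pvC_mono (cs : List Char) (prev : Option Char) {k k' : Nat} (h : k ≤ k') :
    pvC prev cs k ≤ pvC prev cs k' := by
  induction h with
  | refl => exact le_refl _
  | step h ih => exact le_trans ih (pvC_succ_le cs prev _)

-- pvC in "snoc" form: the cost of one more char is the weight at index k
theorem pvC_succ (cs : List Char) : ∀ (prev : Option Char) (k : Nat), (hk : k < cs.length) →
    pvC prev cs (k + 1)
      = pvC prev cs k + pvW (if k = 0 then prev else some (cs[k-1]?.getD 'a')) (cs[k]'hk) := by
  induction cs with
  | nil => intro prev k h; simp at h
  | cons c rest ih =>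
    intro prev k hk
    cases k with
    | zero => simp [pvC, pvC_zero]
    | succ k =>
      have hk' : k < rest.length := by simpa using hk
      have hsel : (if k + 1 = 0 then prev else some (((c :: rest)[k + 1 - 1]?).getD 'a'))
          = (if k = 0 then some c else some ((rest[k - 1]?).getD 'a')) := by
        cases k with
        | zero => simp
        | succ n => simp
      simp only [pvC, List.getElem_cons_succ]
      rw [ih (some c) k hk', hsel]
      ring

-- pvF = none ↔ the text is empty or the total cost stays within m
theorem pvF_none (m : Int) (cs : List Char) : ∀ (t : Int) (prev : Option Char),
    pvF m t prev cs = none ↔ (cs = [] ∨ t + pvC prev cs cs.length ≤ m) := by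
  induction cs with
  | nil => intro t prev; simp [pvF]
  | cons c rest ih =>
    intro t prev
    have hC0 := pvC_nonneg rest (some c) rest.length
    simp only [pvF, List.length_cons, pvC]
    by_cases hgt : t + pvW prev c > m
    · rw [if_pos hgt]
      constructor
      · intro h; exact absurd h (by simp)
      · intro h
        exfalso
        rcases h with h | h
        · simp at h
        · omega
    · rw [if_neg hgt]
      simp only [Option.map_eq_none_iff, ih (t + pvW prev c) (some c)]
      constructor
      · rintro (h | h)
        · right; rw [h]; simp only [pvC]; omega
        · right; omega
      · rintro (h | h)
        · simp at h
        · right; omega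

-- pvF = some j → j < len, cost of j chars ≤ m (unless j = 0), cost of j+1 chars > m
theorem pvF_some (m : Int) (cs : List Char) : ∀ (t : Int) (prev : Option Char) (j : Nat),
    pvF m t prev cs = some j →
      j < cs.length ∧ (j = 0 ∨ t + pvC prev cs j ≤ m) ∧ t + pvC prev cs (j + 1) > m := by
  induction cs with
  | nil => intro t prev j h; simp [pvF] at h
  | cons c rest ih =>
    intro t prev j h
    simp only [pvF] at h
    by_cases hgt : t + pvW prev c > m
    · rw [if_pos hgt] at h
      have hj : j = 0 := by simpa using h.symm
      subst hj
      refine ⟨by simp, Or.inl rfl, ?_⟩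
      simp only [pvC, pvC_zero]
      omega
    · rw [if_neg hgt] at h
      rcases Option.map_eq_some_iff.mp h with ⟨j', hj', hjj⟩
      obtain ⟨h1, h2, h3⟩ := ih (t + pvW prev c) (some c) j' hj'
      subst hjj
      refine ⟨by simpa using h1, ?_, ?_⟩
      · right
        rcases h2 with h2 | h2
        · subst h2
          simp only [pvC, pvC_zero]
          omega
        · simp only [pvC]; omega
      · simp only [pvC]; omega

-- the hand-written cost() of Source B computes pvC none, for prefix lengths within the string
theorem pvCostB_eq (cs : List Char) (k : Nat) (hk : k ≤ cs.length) :
    pvCostB cs (k : Int) = pvC none cs k := by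
  induction k with
  | zero =>
    simp [pvCostB, PySem.List.pyRange_one_eq_nil, pvC_zero]
  | succ k ih =>
    have hk' : k ≤ cs.length := by omega
    have hkl : k < cs.length := by omega
    unfold pvCostB
    push_cast
    by_cases h1 : (1:Int) ≤ (k:Int)
    · have hkn : k ≠ 0 := by omega
      rw [PySem.List.pyRange_one_succ_right h1, List.foldl_append]
      have hbase : pvCostB cs (k : Int) = pvC none cs k := ih hk'
      unfold pvCostB at hbase
      have hget : PySem.List.pyGet? cs (k : Int) = some (cs[k]'hkl) := by
        rw [PySem.List.pyGet?_natCast, List.getElem?_eq_getElem hkl]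
      have hget' : PySem.List.pyGet? cs ((k : Int) - 1) = cs[k-1]? := by
        have h2 : ((k : Int) - 1) = ((k - 1 : Nat) : Int) := by omega
        rw [h2, PySem.List.pyGet?_natCast]
      rw [pvC_succ cs none k hkl]
      simp only [List.foldl_cons, List.foldl_nil, hget, hget']
      have hklm1 : k - 1 < cs.length := by omega
      rw [List.getElem?_eq_getElem hklm1]
      simp only [if_neg hkn, Option.getD_some, pvW]
      by_cases heq : cs[k]'hkl = cs[k-1]'hklm1
      · rw [if_pos (by rw [heq]), if_pos (by rw [heq])]
        omega
      · rw [if_neg (by simpa [eq_comm] using heq),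
          if_neg (by simp only [Option.some_inj]; intro h; exact heq h.symm)]
        omega
    · -- k = 0: range(1,1) is empty; cost 1 = 1, and pvC none cs 1 = pvW none c = 1
      have hk0 : k = 0 := by omega
      subst hk0
      rw [PySem.List.pyRange_one_eq_nil (by omega)]
      cases cs with
      | nil => simp at hkl
      | cons c rest => simp [pvC, pvW, pvC_zero]

-- binary-search invariant: result r lies in [lo,hi], keeps cost r ≤ m (unless r = 0),
-- and every longer prefix (within the string) overshoots
theorem pvBS_spec (cs : List Char) (m : Int) : ∀ (fuel lo hi : Nat), hi - lo ≤ fuel →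
    lo ≤ hi → hi ≤ cs.length →
    (lo = 0 ∨ pvC none cs lo ≤ m) →
    (∀ k, hi < k → k ≤ cs.length → pvC none cs k > m) →
    lo ≤ pvBS cs m lo hi ∧ pvBS cs m lo hi ≤ hi ∧
      (pvBS cs m lo hi = 0 ∨ pvC none cs (pvBS cs m lo hi) ≤ m) ∧
      (∀ k, pvBS cs m lo hi < k → k ≤ cs.length → pvC none cs k > m) := by
  intro fuel
  induction fuel with
  | zero =>
    intro lo hi hfuel hle hlen hlo hhi
    have : lo = hi := by omega
    subst this
    rw [pvBS, if_neg (by omega)]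
    exact ⟨le_refl _, le_refl _, hlo, hhi⟩
  | succ fuel ih =>
    intro lo hi hfuel hle hlen hlo hhi
    by_cases hlt : lo < hi
    · rw [pvBS, if_pos hlt]
      set mid := (lo + hi + 1) / 2 with hmid
      have hmid1 : lo < mid := by omega
      have hmid2 : mid ≤ hi := by omega
      have hcost : pvCostB cs (mid : Int) = pvC none cs mid := pvCostB_eq cs mid (by omega)
      by_cases hc : pvCostB cs (mid : Int) ≤ m
      · rw [if_pos hc]
        have := ih mid hi (by omega) (by omega) hlen (Or.inr (hcost ▸ hc)) hhi
        exact ⟨by omega, this.2.1, this.2.2.1, this.2.2.2⟩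
      · rw [if_neg hc]
        have hover : ∀ k, mid - 1 < k → k ≤ cs.length → pvC none cs k > m := by
          intro k hk _
          have := pvC_mono cs none (show mid ≤ k by omega)
          rw [← hcost] at this
          omega
        have := ih lo (mid - 1) (by omega) (by omega) (by omega) hlo hover
        exact ⟨this.1, by omega, this.2.2.1, this.2.2.2⟩
    · rw [pvBS, if_neg hlt]
      have : lo = hi := by omega
      subst this
      exact ⟨le_refl _, le_refl _, hlo, hhi⟩

-- A's loop computes the same cut index as pvF on the remaining suffix
theorem pvLoopA_eq (cs : List Char) (m : Int) : ∀ (n i : Nat) (cost : Int),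
    cs.length - i = n → i ≤ cs.length →
    pvLoopA cs m i cost =
      String.mk (match pvF m cost (if i = 0 then none else (cs[i-1]?.getD 'a' |> some)) (cs.drop i) with
        | some j => cs.take (i + j)
        | none => cs) := by
  intro n
  induction n with
  | zero =>
    intro i cost hn hle
    have hi : i = cs.length := by omega
    rw [pvLoopA]
    simp [hi, pvF]
  | succ n ih =>
    intro i cost hn hle
    have hlt : i < cs.length := by omega
    have hdrop : cs.drop i = cs[i] :: cs.drop (i+1) := List.drop_eq_getElem_cons hlt
    have hprev : ((i ≠ 0 ∧ cs[i]? = cs[i-1]?) ↔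
        ((if i = 0 then none else (cs[i-1]?.getD 'a' |> some)) = some cs[i])) := by
      by_cases h0 : i = 0
      · simp [h0]
      · have hm1 : i - 1 < cs.length := by omega
        simp only [h0, ne_eq, not_false_iff, true_and, List.getElem?_eq_getElem hlt,
          List.getElem?_eq_getElem hm1, if_false, Option.getD_some, Option.some_inj]
        exact eq_comm
    have hnext : (if i + 1 = 0 then none else ((cs[(i+1)-1]?.getD 'a' |> some) : Option Char)) = some cs[i] := by
      rw [if_neg (Nat.succ_ne_zero i)]
      simp [List.getElem?_eq_getElem hlt]
    rw [pvLoopA]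
    simp only [dif_pos hlt, hdrop, pvF]
    by_cases hc : i ≠ 0 ∧ cs[i]? = cs[i-1]?
    · have hw : pvW (if i = 0 then none else (cs[i-1]?.getD 'a' |> some)) cs[i] = 2 := by
        simp [pvW, hprev.mp hc]
      rw [if_pos hc, hw]
      by_cases hgt : cost + 2 > m
      · simp [hgt]
      · rw [if_neg hgt, if_neg hgt, ih (i+1) (cost + 2) (by omega) (by omega), hnext]
        cases hF : pvF m (cost + 2) (some cs[i]) (cs.drop (i+1)) with
        | none => simp
        | some j =>
          simp only [Option.map_some]
          rw [(by omega : i + 1 + j = i + (j + 1))]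
    · have hw : pvW (if i = 0 then none else (cs[i-1]?.getD 'a' |> some)) cs[i] = 1 := by
        have hp : ¬ ((if i = 0 then none else (cs[i-1]?.getD 'a' |> some)) = some cs[i]) :=
          fun h => hc (hprev.mpr h)
        simp only [pvW]; rw [if_neg hp]
      rw [if_neg hc, hw]
      by_cases hgt : cost + 1 > m
      · simp [hgt]
      · rw [if_neg hgt, if_neg hgt, ih (i+1) (cost + 1) (by omega) (by omega), hnext]
        cases hF : pvF m (cost + 1) (some cs[i]) (cs.drop (i+1)) with
        | none => simp
        | some j =>
          simp only [Option.map_some]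
          rw [(by omega : i + 1 + j = i + (j + 1))]

-- ===== VERDICT (by name: the statement is the Claim_ definition above) =====
theorem preprocess_label_spec : Claim_equal_preprocess_label := by
  intro text m _
  unfold Spec_preprocess_label preprocess_label preprocess_label_alt
  set cs := text.toList with hcs
  rw [pvLoopA_eq cs m cs.length 0 0 (by omega) (by omega)]
  simp only [List.drop_zero, if_true]
  obtain ⟨hr1, hr2, hr3, hr4⟩ :=
    pvBS_spec cs m cs.length 0 cs.length (by omega) (by omega) (le_refl _)
      (Or.inl rfl) (fun k hk hk' => absurd hk (by omega))
  set r := pvBS cs m 0 cs.length with hr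
  cases hF : pvF m 0 none cs with
  | none =>
    have htot := (pvF_none m cs 0 none).mp hF
    have hrn : r = cs.length := by
      rcases htot with hnil | htot
      · have : cs.length = 0 := by simp [hnil]
        omega
      · by_contra hne
        have := hr4 cs.length (by omega) (le_refl _)
        omega
    rw [show (match (none : Option Nat) with | some j => List.take (0 + j) cs | none => cs) = cs from rfl,
      hrn, List.take_length]
  | some j =>
    obtain ⟨hjn, hjle, hjgt⟩ := pvF_some m cs 0 none j hF
    have hrj : r = j := by
      rcases Nat.lt_trichotomy r j with h | h | h
      · have hj0 : j ≠ 0 := by omega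
        have hCj : (0 : Int) + pvC none cs j ≤ m := hjle.resolve_left hj0
        have := hr4 j h (by omega)
        omega
      · exact h
      · have hmono : pvC none cs (j + 1) ≤ pvC none cs r := pvC_mono cs none (by omega)
        have hr0 : r ≠ 0 := by omega
        have hCr : pvC none cs r ≤ m := hr3.resolve_left hr0
        omega
    rw [show (match (some j : Option Nat) with | some j => List.take (0 + j) cs | none => cs)
        = List.take (0 + j) cs from rfl, hrj]
    simp
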